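-- pv_equiv track=rewrite | github.com/wenzyxx00/LMCache | tests/v1/multiprocess/test_skip_first_n_tokens.py | compute_retrieve_plan
-- ===== SOURCE A (Python) =====
-- def compute_retrieve_plan(
--     num_chunks: int,
--     chunk_size: int,
--     skip_first_n_tokens: int,
-- ) -> list[tuple[int, int]]:
--     """
--     Reproduce the skip logic from CacheServer.retrieve._retrieve_loop.
--
--     Returns a list of (chunk_index, skip_in_chunk) for each chunk that
--     would actually be written to the paged buffer (i.e., not fully skipped).
--     """
--     written_chunks = []
--     for idx in range(num_chunks):
--         chunk_start = idx * chunk_size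
--         chunk_end = chunk_start + chunk_size
--
--         effective_start = max(chunk_start, skip_first_n_tokens)
--         effective_start = min(effective_start, chunk_end)
--         if effective_start >= chunk_end:
--             continue
--
--         skip_in_chunk = max(0, min(effective_start - chunk_start, chunk_size - 1))
--         written_chunks.append((idx, skip_in_chunk))
--     return written_chunks
-- ===== SOURCE B (Python) =====
-- def compute_retrieve_plan(
--     num_chunks: int,
--     chunk_size: int,
--     skip_first_n_tokens: int,
-- ) -> list[tuple[int, int]]:
--     # Closed form: all chunks wholly below the skip point are dropped; the first
--     # surviving chunk gets the residual skip, every later chunk gets skip 0.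
--     if num_chunks <= 0 or chunk_size <= 0:
--         return []
--     first = max(0, skip_first_n_tokens // chunk_size)
--     if first >= num_chunks:
--         return []
--     first_skip = max(0, skip_first_n_tokens - first * chunk_size)
--     return [(first, first_skip)] + [(i, 0) for i in range(first + 1, num_chunks)]
-- ===== Notes on version B (the rewrite author's own statement) =====
-- stated objective: faster
-- what changed: Replaces the per-chunk loop (which recomputes the clamped effective start for every chunk, including fully skipped ones) by a closed form: the first written chunk index is max(0, skip // chunk_size), it alone gets the residual skip, and all later chunks get skip 0.
import Mathlib
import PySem

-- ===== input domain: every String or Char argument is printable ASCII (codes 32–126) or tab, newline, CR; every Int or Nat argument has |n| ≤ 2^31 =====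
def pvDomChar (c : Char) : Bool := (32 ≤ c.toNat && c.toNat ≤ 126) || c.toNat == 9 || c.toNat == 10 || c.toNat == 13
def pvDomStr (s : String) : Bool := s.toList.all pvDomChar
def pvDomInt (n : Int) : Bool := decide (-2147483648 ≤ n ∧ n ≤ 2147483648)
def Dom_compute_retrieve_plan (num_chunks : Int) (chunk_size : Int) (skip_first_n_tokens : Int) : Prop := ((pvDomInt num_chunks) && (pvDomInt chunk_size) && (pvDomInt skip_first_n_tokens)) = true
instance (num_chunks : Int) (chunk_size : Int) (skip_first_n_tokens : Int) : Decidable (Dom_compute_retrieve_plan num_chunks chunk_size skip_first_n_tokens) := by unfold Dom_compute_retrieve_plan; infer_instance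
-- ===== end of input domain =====

-- B replaces A's per-chunk loop by a closed form: the first written chunk is
-- max 0 (skip // chunk_size) and only that chunk carries a nonzero in-chunk skip
-- (objective: faster — work proportional to the written chunks only).

-- ===== PORT A =====
def compute_retrieve_plan (num_chunks : Int) (chunk_size : Int) (skip_first_n_tokens : Int) : List (Int × Int) :=
  (PySem.List.pyRange 0 num_chunks 1).foldl (fun written_chunks idx =>
    let chunk_start := idx * chunk_size
    let chunk_end := chunk_start + chunk_size
    let effective_start := max chunk_start skip_first_n_tokens
    let effective_start := min effective_start chunk_end
    if chunk_end ≤ effective_start then written_chunks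
    else written_chunks ++ [(idx, max 0 (min (effective_start - chunk_start) (chunk_size - 1)))]) []

-- ===== PORT B =====
def compute_retrieve_plan_alt (num_chunks : Int) (chunk_size : Int) (skip_first_n_tokens : Int) : List (Int × Int) :=
  if num_chunks ≤ 0 ∨ chunk_size ≤ 0 then []
  else
    let first := max 0 (PySem.Int.floordiv skip_first_n_tokens chunk_size)
    if num_chunks ≤ first then []
    else
      let first_skip := max 0 (skip_first_n_tokens - first * chunk_size)
      (first, first_skip) :: (PySem.List.pyRange (first + 1) num_chunks 1).map (fun i => (i, 0))

-- ===== PRECONDITION & SPEC =====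
def Spec_compute_retrieve_plan (num_chunks : Int) (chunk_size : Int) (skip_first_n_tokens : Int) (out : List (Int × Int)) : Prop := out = compute_retrieve_plan_alt num_chunks chunk_size skip_first_n_tokens
instance (num_chunks : Int) (chunk_size : Int) (skip_first_n_tokens : Int) (out : List (Int × Int)) : Decidable (Spec_compute_retrieve_plan num_chunks chunk_size skip_first_n_tokens out) := by unfold Spec_compute_retrieve_plan; infer_instance

-- ===== CLAIM (what is proved, stated in full; the proofs are below) =====
def Claim_equal_compute_retrieve_plan : Prop := ∀ (num_chunks : Int) (chunk_size : Int) (skip_first_n_tokens : Int), Dom_compute_retrieve_plan num_chunks chunk_size skip_first_n_tokens → Spec_compute_retrieve_plan num_chunks chunk_size skip_first_n_tokens (compute_retrieve_plan num_chunks chunk_size skip_first_n_tokens)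

-- ===== LEMMAS AND PROOFS =====

-- A's loop body as a filtered map
theorem pv_A_filter_map (n cs sk : Int) :
    compute_retrieve_plan n cs sk =
      ((PySem.List.pyRange 0 n 1).filter
        (fun idx => decide (min (max (idx * cs) sk) (idx * cs + cs) < idx * cs + cs))).map
        (fun idx => (idx, max 0 (min (min (max (idx * cs) sk) (idx * cs + cs) - idx * cs) (cs - 1)))) := by
  unfold compute_retrieve_plan
  rw [show (fun (written_chunks : List (Int × Int)) (idx : Int) =>
      let chunk_start := idx * cs
      let chunk_end := chunk_start + cs
      let effective_start := max chunk_start sk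
      let effective_start := min effective_start chunk_end
      if chunk_end ≤ effective_start then written_chunks
      else written_chunks ++ [(idx, max 0 (min (effective_start - chunk_start) (cs - 1)))]) =
    (fun written_chunks idx =>
      if (fun idx => decide (min (max (idx * cs) sk) (idx * cs + cs) < idx * cs + cs)) idx
      then written_chunks ++ [(fun idx => (idx, max 0 (min (min (max (idx * cs) sk) (idx * cs + cs) - idx * cs) (cs - 1)))) idx]
      else written_chunks) from by
        funext acc idx
        simp only [decide_eq_true_eq]
        by_cases h : idx * cs + cs ≤ min (max (idx * cs) sk) (idx * cs + cs)
        · rw [if_pos h, if_neg (by omega)]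
        · rw [if_neg h, if_pos (by omega)]]
  rw [PySem.List.foldl_append_if]
  simp

theorem compute_retrieve_plan_eq (n cs sk : Int) :
    compute_retrieve_plan n cs sk = compute_retrieve_plan_alt n cs sk := by
  rw [pv_A_filter_map]
  unfold compute_retrieve_plan_alt
  by_cases hdeg : n ≤ 0 ∨ cs ≤ 0
  · rw [if_pos hdeg]
    rcases hdeg with hn | hcs
    · rw [PySem.List.pyRange_one_eq_nil (by omega)]
      simp
    · have hfil : (PySem.List.pyRange 0 n 1).filter
          (fun idx => decide (min (max (idx * cs) sk) (idx * cs + cs) < idx * cs + cs)) = [] := by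
        apply List.filter_eq_nil_iff.mpr
        intro x _
        simp only [decide_eq_true_eq]
        omega
      rw [hfil]
      simp
  · rw [if_neg hdeg]
    push Not at hdeg
    obtain ⟨hn, hcs⟩ := hdeg
    set fd := PySem.Int.floordiv sk cs with hfd
    set f0 := max 0 fd with hf0
    have hfdle : fd * cs ≤ sk := by
      have := (PySem.Int.le_floordiv_iff_mul_le (a := sk) (b := cs) (q := fd) (by omega)).mp le_rfl
      exact this
    have hfdlt : sk < (fd + 1) * cs := by
      have := (PySem.Int.floordiv_lt_iff_lt_mul (a := sk) (b := cs) (q := fd + 1) (by omega)).mp (by omega)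
      exact this
    -- predicate on nonneg idx ↔ f0 ≤ idx
    have hpred : ∀ idx : Int, 0 ≤ idx →
        ((min (max (idx * cs) sk) (idx * cs + cs) < idx * cs + cs) ↔ f0 ≤ idx) := by
      intro idx hidx
      constructor
      · intro h
        have hsk : sk < idx * cs + cs := by omega
        -- sk < (idx+1)*cs → fd ≤ idx
        have : fd < idx + 1 := by
          rw [hfd]
          exact (PySem.Int.floordiv_lt_iff_lt_mul (by omega)).mpr (by nlinarith)
        omega
      · intro h
        have hfdidx : fd ≤ idx := by omega
        have : (fd + 1) * cs ≤ (idx + 1) * cs :=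
          mul_le_mul_of_nonneg_right (by omega) (by omega)
        have hsk : sk < idx * cs + cs := by nlinarith
        omega
    -- split the range at min f0 n
    have hsplit := PySem.List.pyRange_one_append 0 (min f0 n) n (by omega) (by omega)
    rw [hsplit, List.filter_append]
    have hlow : (PySem.List.pyRange 0 (min f0 n) 1).filter
        (fun idx => decide (min (max (idx * cs) sk) (idx * cs + cs) < idx * cs + cs)) = [] := by
      apply List.filter_eq_nil_iff.mpr
      intro x hx
      rw [PySem.List.mem_pyRange_one] at hx
      simp only [decide_eq_true_eq]
      rw [hpred x hx.1]
      omega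
    have hhigh : (PySem.List.pyRange (min f0 n) n 1).filter
        (fun idx => decide (min (max (idx * cs) sk) (idx * cs + cs) < idx * cs + cs)) =
        PySem.List.pyRange (min f0 n) n 1 := by
      apply List.filter_eq_self.mpr
      intro x hx
      rw [PySem.List.mem_pyRange_one] at hx
      simp only [decide_eq_true_eq]
      rw [hpred x (by omega)]
      omega
    rw [hlow, hhigh, List.nil_append]
    by_cases hcase : n ≤ f0
    · rw [if_pos hcase]
      rw [show min f0 n = n by omega, PySem.List.pyRange_one_eq_nil le_rfl]
      simp
    · rw [if_neg hcase]
      rw [show min f0 n = f0 by omega, PySem.List.pyRange_one_cons (by omega), List.map_cons]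
      congr 1
      · -- head chunk: its in-chunk skip is the residual skip
        have hsnd : max 0 (min (min (max (f0 * cs) sk) (f0 * cs + cs) - f0 * cs) (cs - 1)) =
            max 0 (sk - f0 * cs) := by
          by_cases hfd0 : 0 ≤ fd
          · have he : f0 = fd := by omega
            have h1 : f0 * cs ≤ sk := he ▸ hfdle
            have h2 : sk < f0 * cs + cs := by
              have hr : (fd + 1) * cs = fd * cs + cs := by ring
              rw [he]; omega
            omega
          · have h0 : f0 = 0 := by omega
            have hneg : sk < 0 := by
              have hm := mul_le_mul_of_nonneg_right (show fd + 1 ≤ (0:Int) by omega)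
                (show (0:Int) ≤ cs by omega)
              rw [zero_mul] at hm
              omega
            rw [h0]
            simp only [zero_mul]
            omega
        rw [hsnd]
      · -- tail chunks: every idx ≥ f0+1 has in-chunk skip 0
        apply List.map_congr_left
        intro x hx
        rw [PySem.List.mem_pyRange_one] at hx
        have hskle : sk ≤ x * cs := by
          have h1 : (fd + 1) * cs ≤ x * cs := mul_le_mul_of_nonneg_right (by omega) (by omega)
          omega
        have hz : max 0 (min (min (max (x * cs) sk) (x * cs + cs) - x * cs) (cs - 1)) = 0 := by
          omega
        rw [hz]

-- ===== VERDICT (by name: the statement is the Claim_ definition above) =====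
theorem compute_retrieve_plan_spec : Claim_equal_compute_retrieve_plan := by
  intro n cs sk _
  unfold Spec_compute_retrieve_plan
  exact compute_retrieve_plan_eq n cs sk
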